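-- pv_equiv track=rewrite | github.com/zzarbttoo/algorithm | test/ka_intern_winter_2019/5.py | solution
-- ===== SOURCE A (Python) =====
-- def solution(stones, k):
--
--     start, end = 0, max(stones)
--     answer = 0
--
--     while start <= end:
--         mid = (start + end) // 2
--         cnt = 0
--         pos = True
--         for s in stones:
--             if s - mid + 1 <= 0:
--                 cnt += 1
--                 if cnt >= k:
--                     pos = False
--                     break
--             else:
--                 cnt = 0
--         if pos:
--             start = mid + 1
--             if answer < mid:
--                 answer = mid
--         else:
--             end = mid - 1
--     return answer
-- ===== SOURCE B (Python) =====
-- def _push(st, v):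
--     # push v on a max-annotated stack: each entry carries the max of itself
--     # and everything below it
--     m = st[-1][1] if st else v
--     st.append((v, m if m > v else v))
--
--
-- def solution(stones, k):
--     # Answer = min over all windows of max(k,1) consecutive stones of the
--     # window maximum (whole-list max if the window is longer than the list),
--     # clamped below at 0.  Window maxima come from a queue-with-max built
--     # out of two max-annotated stacks (amortized O(1) per stone).
--     kk = k if k > 1 else 1
--     n = len(stones)
--     if kk > n:
--         m = max(stones)
--     else:
--         front, back = [], []
--         m = None
--         for i in range(n):
--             _push(back, stones[i])
--             if i >= kk:
--                 if not front:
--                     while back: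
--                         v = back.pop()[0]
--                         _push(front, v)
--                 front.pop()
--             if i >= kk - 1:
--                 fb = front[-1][1] if front else back[-1][1]
--                 bb = back[-1][1] if back else front[-1][1]
--                 w = fb if fb > bb else bb
--                 if m is None or w < m:
--                     m = w
--     return m if m > 0 else 0
-- ===== Notes on version B (the rewrite author's own statement) =====
-- stated objective: faster
-- what changed: A binary-searches the answer over [0, max(stones)], re-scanning the whole list for a length-k run of too-low stones at every candidate height; B makes a single pass computing the minimum over all windows of max(k,1) consecutive stones of the window maximum (whole-list maximum if the window exceeds the list, clamped below at 0) using a queue-with-max built from two max-annotated stacks.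
import Mathlib
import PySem

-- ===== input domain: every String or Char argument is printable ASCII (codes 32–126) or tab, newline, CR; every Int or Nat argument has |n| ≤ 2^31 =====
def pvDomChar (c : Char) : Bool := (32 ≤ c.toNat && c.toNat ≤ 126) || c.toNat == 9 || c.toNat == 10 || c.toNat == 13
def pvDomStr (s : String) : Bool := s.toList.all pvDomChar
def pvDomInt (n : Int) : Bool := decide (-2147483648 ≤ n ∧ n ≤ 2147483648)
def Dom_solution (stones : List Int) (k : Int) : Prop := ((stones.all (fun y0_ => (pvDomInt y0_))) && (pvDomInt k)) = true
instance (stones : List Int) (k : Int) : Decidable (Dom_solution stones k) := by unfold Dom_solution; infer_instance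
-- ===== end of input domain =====

-- B replaces A's binary search over candidate heights (a full scan per candidate)
-- by one pass computing the minimum over all max(k,1)-windows of the window maximum
-- with a two-stack sliding-window-max queue, clamped below at 0.

-- ===== PORT A =====
-- inner `for s in stones` loop of A: returns the final `pos` flag
-- (`break` on cnt reaching k = early return false)
def solInner (k mid : Int) : List Int → Int → Bool
  | [], _ => true
  | s :: rest, cnt =>
    if s - mid + 1 ≤ 0 then
      if cnt + 1 ≥ k then false
      else solInner k mid rest (cnt + 1)
    else solInner k mid rest 0

-- the `while start <= end` binary-search loop of A
def solLoop (stones : List Int) (k : Int) (start e answer : Int) : Int :=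
  if h : start ≤ e then
    if solInner k (PySem.Int.floordiv (start + e) 2) stones 0 then
      solLoop stones k (PySem.Int.floordiv (start + e) 2 + 1) e
        (if answer < PySem.Int.floordiv (start + e) 2 then PySem.Int.floordiv (start + e) 2 else answer)
    else
      solLoop stones k start (PySem.Int.floordiv (start + e) 2 - 1) answer
  else answer
termination_by (e + 1 - start).toNat
decreasing_by
  · have := PySem.Int.floordiv_two_mid_bounds h; omega
  · have := PySem.Int.floordiv_two_mid_bounds h; omega

def solution (stones : List Int) (k : Int) : Int :=
  match PySem.List.max? stones (fun y => y) with
  | none => 0   -- max([]) raises ValueError in Python; excluded by Pre_solution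
  | some e => solLoop stones k 0 e 0

-- ===== PORT B =====
-- max(w) as Source B applies it; every list B applies it to is nonempty, so 0 is unreachable
def winMax (w : List Int) : Int :=
  match PySem.List.max? w (fun y => y) with
  | some x => x
  | none => 0

-- _push(st, v): push v on a max-annotated stack (list head = Python st[-1])
def pushMax (st : List (Int × Int)) (v : Int) : List (Int × Int) :=
  let m := match st with | [] => v | (_, mx) :: _ => mx
  (v, if m > v then m else v) :: st

-- `while back: v = back.pop()[0]; _push(front, v)`
def transfer (front back : List (Int × Int)) : List (Int × Int) :=
  match back with
  | [] => front
  | (v, _) :: rest => transfer (pushMax front v) rest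

-- `st[-1][1] if st else other[-1][1]` (both empty is unreachable: window nonempty)
def topMax (st other : List (Int × Int)) : Int :=
  match st with
  | (_, mx) :: _ => mx
  | [] => match other with | (_, mx) :: _ => mx | [] => 0

-- `if m is None or w < m: m = w`
def mUpd (m : Option Int) (w : Int) : Option Int :=
  match m with
  | none => some w
  | some mv => if w < mv then some w else some mv

-- the `for i in range(n)` loop of Source B over the two-stack queue
def slideQ (kk : Int) : List Int → Int → List (Int × Int) → List (Int × Int) → Option Int → Option Int
  | [], _, _, _, m => m
  | x :: rest, i, front, back, m =>
    let back1 := pushMax back x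
    let fb2 : List (Int × Int) × List (Int × Int) :=
      if kk ≤ i then
        if front = [] then ((transfer front back1).tail, ([] : List (Int × Int)))
        else (front.tail, back1)   -- front.pop(); popping an empty front is unreachable
      else (front, back1)
    let m1 : Option Int :=
      if kk - 1 ≤ i then
        let fb := topMax fb2.1 fb2.2
        let bb := topMax fb2.2 fb2.1
        mUpd m (if fb > bb then fb else bb)
      else m
    slideQ kk rest (i + 1) fb2.1 fb2.2 m1

def solution_alt (stones : List Int) (k : Int) : Int :=
  let kk : Int := if k > 1 then k else 1
  let n : Int := stones.length
  let m : Option Int :=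
    if kk > n then some (winMax stones)
    else slideQ kk stones 0 [] [] none
  match m with
  | some mv => if mv > 0 then mv else 0
  | none => 0  -- unreachable: kk ≤ n records at least one window

-- ===== PRECONDITION & SPEC =====
-- A calls max(stones), which raises ValueError on the empty list (B's max raises there too).
def Pre_solution (stones : List Int) (k : Int) : Prop := stones ≠ []
instance (stones : List Int) (k : Int) : Decidable (Pre_solution stones k) := by
  unfold Pre_solution; infer_instance
def pvWitness_solution : List Int × Int := ([2, 4, 5, 3, 8, 1, 4], 3)

def Spec_solution (stones : List Int) (k : Int) (out : Int) : Prop := out = solution_alt stones k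
instance (stones : List Int) (k : Int) (out : Int) : Decidable (Spec_solution stones k out) := by unfold Spec_solution; infer_instance

-- ===== CLAIM (what is proved, stated in full; the proofs are below) =====
def Claim_equal_solution : Prop := ∀ (stones : List Int) (k : Int), Dom_solution stones k → Pre_solution stones k → Spec_solution stones k (solution stones k)

-- ===== LEMMAS AND PROOFS =====

-- effective run length: Python's loop breaks as soon as cnt reaches k, and any
-- single below-mid stone already gives cnt = 1 ≥ k when k ≤ 1
def kkN (k : Int) : Nat := (max k 1).toNat

-- "some kkN k consecutive stones are all below mid"
def badrun (k mid : Int) (l : List Int) : Prop :=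
  ∃ i : Nat, i + kkN k ≤ l.length ∧ ∀ x ∈ (l.drop i).take (kkN k), x < mid

-- min(w) of a nonempty list, as the B-side match produces it
def minOf (w : List Int) : Int := match w with | [] => 0 | x :: t => t.foldl min x

lemma inner_iff (k mid : Int) : ∀ (l : List Int) (cnt : Int), 0 ≤ cnt →
    (solInner k mid l cnt = false ↔
      badrun k mid l ∨ ∃ p q, l = p ++ q ∧ p ≠ [] ∧ (∀ x ∈ p, x < mid) ∧ k ≤ cnt + p.length) := by
  intro l
  have hk1 : 1 ≤ kkN k := by unfold kkN; omega
  have hkk : k ≤ (kkN k : Int) := by unfold kkN; omega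
  induction l with
  | nil =>
    intro cnt h0
    simp only [solInner]
    constructor
    · intro h; cases h
    · rintro (⟨i, hi, _⟩ | ⟨p, q, hpq, hne, _, _⟩)
      · exfalso; simp only [List.length_nil] at hi; omega
      · exact absurd hpq.symm (by simp [hne])
  | cons s rest ih =>
    intro cnt h0
    by_cases hs : s - mid + 1 ≤ 0
    · have hslt : s < mid := by omega
      by_cases hbrk : cnt + 1 ≥ k
      · simp only [solInner, if_pos hs, if_pos hbrk]
        constructor
        · intro _
          right
          exact ⟨[s], rest, rfl, by simp, by intro x hx; simp at hx; omega, by simp; omega⟩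
        · intro _; trivial
      · simp only [solInner, if_pos hs, if_neg hbrk]
        rw [ih (cnt + 1) (by omega)]
        have hk2 : 2 ≤ kkN k := by unfold kkN; omega
        constructor
        · rintro (⟨i, hi, hall⟩ | ⟨p, q, hq, hne, hall, hlen⟩)
          · exact Or.inl ⟨i + 1, by simp; omega, by simpa [List.drop_succ_cons] using hall⟩
          · refine Or.inr ⟨s :: p, q, by simp [hq], by simp, ?_, ?_⟩
            · intro x hx
              rcases List.mem_cons.1 hx with rfl | hx
              · exact hslt
              · exact hall x hx
            · simp only [List.length_cons]; push_cast at hlen ⊢; omega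
        · rintro (⟨i, hi, hall⟩ | ⟨p, q, hq, hne, hall, hlen⟩)
          · cases i with
            | zero =>
              right
              have hlen' : kkN k - 1 ≤ rest.length := by simp at hi; omega
              refine ⟨rest.take (kkN k - 1), rest.drop (kkN k - 1), (List.take_append_drop _ _).symm,
                ?_, ?_, ?_⟩
              · intro h
                have := congrArg List.length h
                simp [hlen'] at this
                omega
              · intro x hx
                apply hall
                have : kkN k = (kkN k - 1) + 1 := by omega
                rw [this, List.drop_zero, List.take_succ_cons]
                exact List.mem_cons_of_mem _ hx
              · rw [List.length_take]; push_cast; omega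
            | succ i =>
              exact Or.inl ⟨i, by simp at hi ⊢; omega, by simpa [List.drop_succ_cons] using hall⟩
          · rcases p with _ | ⟨s', p'⟩
            · exact absurd rfl hne
            · simp only [List.cons_append, List.cons.injEq] at hq
              obtain ⟨rfl, hq⟩ := hq
              rcases p' with _ | ⟨x, p''⟩
              · exfalso; simp at hlen; omega
              · refine Or.inr ⟨x :: p'', q, hq, by simp, ?_, ?_⟩
                · intro y hy; exact hall y (List.mem_cons_of_mem _ hy)
                · simp only [List.length_cons] at hlen ⊢; push_cast at hlen ⊢; omega
    · have hsge : mid ≤ s := by omega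
      simp only [solInner, if_neg hs]
      rw [ih 0 le_rfl]
      constructor
      · rintro (⟨i, hi, hall⟩ | ⟨p, q, hq, hne, hall, hlen⟩)
        · exact Or.inl ⟨i + 1, by simp; omega, by simpa [List.drop_succ_cons] using hall⟩
        · have hplen : kkN k ≤ p.length := by
            have := List.length_pos_of_ne_nil hne
            unfold kkN; omega
          refine Or.inl ⟨1, ?_, ?_⟩
          · have : p.length ≤ rest.length := by rw [hq]; simp
            simp; omega
          · intro x hx
            apply hall
            rw [List.drop_succ_cons, List.drop_zero, hq,
              List.take_append_of_le_length hplen] at hx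
            exact List.mem_of_mem_take hx
      · rintro (⟨i, hi, hall⟩ | ⟨p, q, hq, hne, hall, hlen⟩)
        · cases i with
          | zero =>
            exfalso
            have hmem : s ∈ ((s :: rest).drop 0).take (kkN k) := by
              have : kkN k = (kkN k - 1) + 1 := by omega
              rw [this, List.drop_zero, List.take_succ_cons]
              exact List.mem_cons_self
            have := hall s hmem
            omega
          | succ i =>
            exact Or.inl ⟨i, by simp at hi ⊢; omega, by simpa [List.drop_succ_cons] using hall⟩
        · rcases p with _ | ⟨s', p'⟩
          · exact absurd rfl hne
          · simp only [List.cons_append, List.cons.injEq] at hq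
            obtain ⟨rfl, hq⟩ := hq
            exact absurd (hall s List.mem_cons_self) (by omega)

lemma inner_zero_iff (k mid : Int) (l : List Int) :
    solInner k mid l 0 = false ↔ badrun k mid l := by
  rw [inner_iff k mid l 0 le_rfl]
  constructor
  · rintro (h | ⟨p, q, hq, hne, hall, hlen⟩)
    · exact h
    · have hplen : kkN k ≤ p.length := by
        have := List.length_pos_of_ne_nil hne
        unfold kkN; omega
      refine ⟨0, by rw [hq]; simp; omega, ?_⟩
      intro x hx
      apply hall
      rw [List.drop_zero, hq, List.take_append_of_le_length hplen] at hx
      exact List.mem_of_mem_take hx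
  · exact Or.inl

lemma loop_eq (stones : List Int) (k m : Int)
    (hP : ∀ mid, solInner k mid stones 0 = true ↔ mid ≤ m) :
    ∀ (start e answer : Int),
      solLoop stones k start e answer =
        if start ≤ e ∧ start ≤ m then max answer (min m e) else answer := by
  suffices h : ∀ (N : Nat) (start e answer : Int), (e + 1 - start).toNat ≤ N →
      solLoop stones k start e answer =
        if start ≤ e ∧ start ≤ m then max answer (min m e) else answer by
    intro start e answer; exact h _ start e answer le_rfl
  intro N
  induction N with
  | zero =>
    intro start e answer hle
    have h : ¬ start ≤ e := by omega
    rw [solLoop, dif_neg h, if_neg (by tauto)]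
  | succ N ih =>
    intro start e answer hle
    rw [solLoop]
    by_cases h : start ≤ e
    · obtain ⟨hm1, hm2⟩ := PySem.Int.floordiv_two_mid_bounds h
      rw [dif_pos h]
      by_cases hp : solInner k (PySem.Int.floordiv (start + e) 2) stones 0 = true
      · rw [if_pos hp, ih _ _ _ (by omega)]
        have hmle := (hP _).1 hp
        split_ifs <;> omega
      · rw [if_neg hp, ih _ _ _ (by omega)]
        have hgt : m < PySem.Int.floordiv (start + e) 2 := by
          by_contra hc
          exact hp ((hP _).2 (by omega))
        split_ifs <;> omega
    · rw [dif_neg h, if_neg (by tauto)]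

lemma loop_eq_true (stones : List Int) (k : Int)
    (hP : ∀ mid, solInner k mid stones 0 = true) :
    ∀ (start e answer : Int),
      solLoop stones k start e answer = if start ≤ e then max answer e else answer := by
  suffices h : ∀ (N : Nat) (start e answer : Int), (e + 1 - start).toNat ≤ N →
      solLoop stones k start e answer = if start ≤ e then max answer e else answer by
    intro start e answer; exact h _ start e answer le_rfl
  intro N
  induction N with
  | zero =>
    intro start e answer hle
    have h : ¬ start ≤ e := by omega
    rw [solLoop, dif_neg h, if_neg h]
  | succ N ih =>
    intro start e answer hle
    rw [solLoop]
    by_cases h : start ≤ e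
    · obtain ⟨hm1, hm2⟩ := PySem.Int.floordiv_two_mid_bounds h
      rw [dif_pos h, if_pos (hP _), ih _ _ _ (by omega)]
      split_ifs <;> omega
    · rw [dif_neg h, if_neg h]

lemma winMax_cons (x : Int) (t : List Int) : winMax (x :: t) = t.foldl max x := by
  simp [winMax, PySem.List.max?_id_cons]

lemma winMax_lt_iff (w : List Int) (hw : w ≠ []) (mid : Int) :
    winMax w < mid ↔ ∀ x ∈ w, x < mid := by
  obtain ⟨x, t, rfl⟩ := List.exists_cons_of_ne_nil hw
  rw [winMax_cons]
  constructor
  · intro h y hy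
    rcases List.mem_cons.1 hy with rfl | hy
    · exact lt_of_le_of_lt (PySem.List.le_foldl_max t y).1 h
    · exact lt_of_le_of_lt ((PySem.List.le_foldl_max t x).2 y hy) h
  · intro h
    rcases PySem.List.foldl_max_mem t x with he | he
    · rw [he]; exact h x (by simp)
    · exact h _ (by simp [he])

lemma winMax_mem (w : List Int) (hw : w ≠ []) : winMax w ∈ w := by
  obtain ⟨x, t, rfl⟩ := List.exists_cons_of_ne_nil hw
  rw [winMax_cons]
  rcases PySem.List.foldl_max_mem t x with he | he
  · rw [he]; exact List.mem_cons_self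
  · exact List.mem_cons_of_mem _ he

lemma le_winMax (w : List Int) (hw : w ≠ []) (y : Int) (hy : y ∈ w) : y ≤ winMax w := by
  obtain ⟨x, t, rfl⟩ := List.exists_cons_of_ne_nil hw
  rw [winMax_cons]
  rcases List.mem_cons.1 hy with rfl | hy
  · exact (PySem.List.le_foldl_max t y).1
  · exact (PySem.List.le_foldl_max t x).2 y hy

lemma minOf_lt_iff (w : List Int) (hw : w ≠ []) (mid : Int) :
    minOf w < mid ↔ ∃ v ∈ w, v < mid := by
  obtain ⟨x, t, rfl⟩ := List.exists_cons_of_ne_nil hw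
  show t.foldl min x < mid ↔ _
  constructor
  · intro h
    rcases PySem.List.foldl_min_mem t x with he | he
    · exact ⟨x, by simp, by rw [← he]; exact h⟩
    · exact ⟨_, by simp [he], h⟩
  · rintro ⟨v, hv, hlt⟩
    rcases List.mem_cons.1 hv with rfl | hv
    · exact lt_of_le_of_lt (PySem.List.foldl_min_le t v).1 hlt
    · exact lt_of_le_of_lt ((PySem.List.foldl_min_le t x).2 v hv) hlt

lemma minOf_mem (w : List Int) (hw : w ≠ []) : minOf w ∈ w := by
  obtain ⟨x, t, rfl⟩ := List.exists_cons_of_ne_nil hw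
  show t.foldl min x ∈ _
  rcases PySem.List.foldl_min_mem t x with he | he
  · rw [he]; exact List.mem_cons_self
  · exact List.mem_cons_of_mem _ he


lemma winMax_cons_max (v : Int) (l : List Int) (hl : l ≠ []) :
    winMax (v :: l) = max v (winMax l) := by
  apply le_antisymm
  · rcases List.mem_cons.1 (winMax_mem (v :: l) (by simp)) with he | he
    · rw [he]  -- hmm winMax_mem gives membership; rewrite goal? do via cases
      exact le_max_left _ _
    · exact le_max_of_le_right (le_winMax l hl _ he)
  · apply max_le
    · exact le_winMax _ (by simp) v List.mem_cons_self
    · exact le_winMax _ (by simp) _ (List.mem_cons_of_mem _ (winMax_mem l hl))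

lemma winMax_append (u v : List Int) (hu : u ≠ []) (hv : v ≠ []) :
    winMax (u ++ v) = max (winMax u) (winMax v) := by
  induction u with
  | nil => exact absurd rfl hu
  | cons a u' ih =>
    rcases eq_or_ne u' [] with rfl | hu'
    · simpa using winMax_cons_max a v hv
    · have h1 : u' ++ v ≠ [] := by simp [hu']
      rw [List.cons_append, winMax_cons_max a _ h1, ih hu', winMax_cons_max a u' hu',
        max_assoc]

lemma winMax_reverse (l : List Int) (hl : l ≠ []) : winMax l.reverse = winMax l := by
  have h1 : l.reverse ≠ [] := by simpa using hl
  apply le_antisymm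
  · exact le_winMax l hl _ (List.mem_reverse.1 (winMax_mem _ h1))
  · exact le_winMax l.reverse h1 _ (List.mem_reverse.2 (winMax_mem _ hl))

def vals (st : List (Int × Int)) : List Int := st.map Prod.fst

def annOK : List (Int × Int) → Prop
  | [] => True
  | (v, mx) :: rest => mx = winMax (v :: vals rest) ∧ annOK rest

lemma vals_pushMax (st : List (Int × Int)) (v : Int) : vals (pushMax st v) = v :: vals st := by
  cases st <;> rfl

lemma annOK_pushMax (st : List (Int × Int)) (v : Int) (h : annOK st) : annOK (pushMax st v) := by
  match st, h with
  | [], _ =>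
    refine ⟨?_, trivial⟩
    simp [vals, winMax_cons]
  | (w, mx) :: rest, ⟨h1, h2⟩ =>
    refine ⟨?_, h1, h2⟩
    show (if mx > v then mx else v) = winMax (v :: vals ((w, mx) :: rest))
    have : vals ((w, mx) :: rest) = w :: vals rest := rfl
    rw [this, winMax_cons_max v _ (by simp), ← h1]
    omega

lemma annOK_tail (st : List (Int × Int)) (h : annOK st) : annOK st.tail := by
  match st, h with
  | [], _ => trivial
  | (v, mx) :: rest, ⟨_, h2⟩ => exact h2

lemma vals_transfer : ∀ (back front : List (Int × Int)),
    vals (transfer front back) = (vals back).reverse ++ vals front := by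
  intro back
  induction back with
  | nil => intro front; simp [transfer, vals]
  | cons e rest ih =>
    intro front
    obtain ⟨v, mx⟩ := e
    show vals (transfer (pushMax front v) rest) = _
    rw [ih, vals_pushMax]
    simp [vals]

lemma annOK_transfer : ∀ (back front : List (Int × Int)), annOK front → annOK (transfer front back) := by
  intro back
  induction back with
  | nil => intro front h; exact h
  | cons e rest ih =>
    intro front h
    obtain ⟨v, mx⟩ := e
    exact ih _ (annOK_pushMax _ _ h)

lemma mUpd_none (w : Int) : mUpd none w = some w := rfl
lemma mUpd_some (mv w : Int) : mUpd (some mv) w = if w < mv then some w else some mv := rfl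

lemma minOf_append_singleton (l : List Int) (hl : l ≠ []) (a : Int) :
    minOf (l ++ [a]) = min (minOf l) a := by
  obtain ⟨x, t, rfl⟩ := List.exists_cons_of_ne_nil hl
  show (t ++ [a]).foldl min x = min (t.foldl min x) a
  rw [List.foldl_append]
  rfl

lemma vals_eq_nil (st : List (Int × Int)) : vals st = [] ↔ st = [] := by
  simp [vals]

lemma tail_append_of_ne_nil {α : Type} (u v : List α) (hu : u ≠ []) :
    (u ++ v).tail = u.tail ++ v := by
  cases u with
  | nil => exact absurd rfl hu
  | cons a u' => rfl

lemma w_eq (front back : List (Int × Int)) (h1 : annOK front) (h2 : annOK back)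
    (hne : vals front ++ (vals back).reverse ≠ []) :
    (if topMax front back > topMax back front then topMax front back else topMax back front)
      = winMax (vals front ++ (vals back).reverse) := by
  rcases front with _ | ⟨⟨v, mf⟩, f'⟩ <;> rcases back with _ | ⟨⟨u, mb⟩, b'⟩
  · exact absurd rfl hne
  · -- front empty, back nonempty
    have hmb : mb = winMax (u :: vals b') := h2.1
    simp only [topMax, vals, List.map_nil, List.nil_append, List.map_cons, ite_self]
    rw [winMax_reverse _ (by simp), hmb]
    rfl
  · -- front nonempty, back empty
    have hmf : mf = winMax (v :: vals f') := h1.1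
    simp only [topMax, vals, List.map_nil, List.reverse_nil, List.append_nil, List.map_cons,
      ite_self]
    rw [hmf]
    rfl
  · -- both nonempty
    have hmf : mf = winMax (v :: vals f') := h1.1
    have hmb : mb = winMax (u :: vals b') := h2.1
    show (if mf > mb then mf else mb) = winMax (vals ((v,mf)::f') ++ (vals ((u,mb)::b')).reverse)
    have hvf : vals ((v,mf)::f') = v :: vals f' := rfl
    have hvb : vals ((u,mb)::b') = u :: vals b' := rfl
    rw [hvf, hvb, winMax_append _ _ (by simp) (by simp),
      winMax_reverse _ (by simp), ← hmf, ← hmb]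
    omega

lemma window_stable (l : List Int) (x : Int) (j K : Nat) (h : j + K ≤ l.length) :
    ((l ++ [x]).drop j).take K = (l.drop j).take K := by
  rw [List.drop_append_of_le_length (by omega),
    List.take_append_of_le_length (by rw [List.length_drop]; omega)]

lemma slideQ_spec (K : Nat) (hK : 1 ≤ K) :
    ∀ (todo done : List Int) (front back : List (Int × Int)) (m : Option Int),
    annOK front → annOK back →
    vals front ++ (vals back).reverse = done.drop (done.length - K) →
    m = (if K ≤ done.length
         then some (minOf ((List.range (done.length - K + 1)).map
                (fun j => winMax ((done.drop j).take K))))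
         else none) →
    slideQ (K : Int) todo (done.length : Int) front back m
      = (if K ≤ done.length + todo.length
         then some (minOf ((List.range ((done ++ todo).length - K + 1)).map
                (fun j => winMax (((done ++ todo).drop j).take K))))
         else none) := by
  intro todo
  induction todo with
  | nil =>
    intro done front back m h1 h2 h3 h4
    show m = _
    rw [h4]
    simp
  | cons x rest ih =>
    intro done front back m h1 h2 h3 h4
    set done' := done ++ [x] with hdone'
    have hlen' : done'.length = done.length + 1 := by simp [hdone']
    have hQ1 : vals front ++ (vals (pushMax back x)).reverse = done'.drop (done.length - K) := by
      rw [vals_pushMax]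
      simp only [List.reverse_cons]
      rw [← List.append_assoc, h3, hdone', List.drop_append_of_le_length (by omega)]
    obtain ⟨F2, B2, hF2B2, hann1, hann2, hQ2⟩ :
        ∃ F2 B2, (if (K:Int) ≤ (done.length:Int) then
             (if front = [] then ((transfer front (pushMax back x)).tail, ([]:List (Int×Int)))
              else (front.tail, pushMax back x))
           else (front, pushMax back x)) = (F2, B2)
          ∧ annOK F2 ∧ annOK B2
          ∧ vals F2 ++ (vals B2).reverse = done'.drop (done'.length - K) := by
      by_cases hpop : K ≤ done.length
      · rw [if_pos (by exact_mod_cast hpop)]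
        have hidx : done.length - K + 1 = done'.length - K := by rw [hlen']; omega
        by_cases hfe : front = []
        · subst hfe
          rw [if_pos rfl]
          refine ⟨_, _, rfl, annOK_tail _ (annOK_transfer _ _ trivial), trivial, ?_⟩
          simp only [vals, List.map_nil, List.nil_append] at hQ1
          show List.map Prod.fst (transfer [] (pushMax back x)).tail ++ ([] : List Int).reverse = _
          rw [List.map_tail]
          show (vals (transfer [] (pushMax back x))).tail ++ ([] : List Int).reverse = _
          rw [vals_transfer]
          simp only [vals, List.map_nil, List.append_nil, List.reverse_nil]
          rw [hQ1, List.tail_drop, hidx]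
        · rw [if_neg hfe]
          refine ⟨_, _, rfl, annOK_tail _ h1, annOK_pushMax _ _ h2, ?_⟩
          show List.map Prod.fst front.tail ++ (vals (pushMax back x)).reverse = _
          rw [List.map_tail]
          show (vals front).tail ++ (vals (pushMax back x)).reverse = _
          rw [← tail_append_of_ne_nil _ _ (by simpa [vals_eq_nil] using hfe), hQ1,
            List.tail_drop, hidx]
      · rw [if_neg (by exact_mod_cast hpop)]
        refine ⟨_, _, rfl, h1, annOK_pushMax _ _ h2, ?_⟩
        have hidx : done'.length - K = done.length - K := by rw [hlen']; omega
        rw [hidx, hQ1]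
    have hQ2ne : vals F2 ++ (vals B2).reverse ≠ [] := by
      apply List.ne_nil_of_length_pos
      rw [hQ2, List.length_drop, hlen']
      omega
    have hw : (if topMax F2 B2 > topMax B2 F2 then topMax F2 B2 else topMax B2 F2)
        = winMax (done'.drop (done'.length - K)) := by
      rw [← hQ2]; exact w_eq F2 B2 hann1 hann2 hQ2ne
    simp only [slideQ, hF2B2]
    have hE : (if (K : Int) - 1 ≤ (done.length : Int) then
                 mUpd m (if topMax F2 B2 > topMax B2 F2 then topMax F2 B2 else topMax B2 F2)
               else m)
        = (if K ≤ done'.length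
           then some (minOf ((List.range (done'.length - K + 1)).map
                  (fun j => winMax ((done'.drop j).take K))))
           else none) := by
      by_cases hrec : K ≤ done.length + 1
      · rw [if_pos (by omega : (K : Int) - 1 ≤ (done.length : Int)),
          if_pos (by rw [hlen']; omega : K ≤ done'.length)]
        by_cases hbefore : K ≤ done.length
        · have hrange : done'.length - K + 1 = (done.length - K + 1) + 1 := by rw [hlen']; omega
          have hstable : (List.range (done.length - K + 1)).map
                (fun j => winMax ((done'.drop j).take K))
              = (List.range (done.length - K + 1)).map (fun j => winMax ((done.drop j).take K)) := by
            apply List.map_congr_left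
            intro j hj
            rw [hdone', window_stable done x j K (by have := List.mem_range.1 hj; omega)]
          have hfull : (done'.drop (done.length - K + 1)).take K = done'.drop (done.length - K + 1) := by
            apply List.take_of_length_le
            rw [List.length_drop, hlen']
            omega
          have hlast : winMax ((done'.drop (done.length - K + 1)).take K)
              = (if topMax F2 B2 > topMax B2 F2 then topMax F2 B2 else topMax B2 F2) := by
            rw [hfull, hw]
            congr 2
            rw [hlen']
            omega
          have hsplit : (List.range (done'.length - K + 1)).map
                (fun j => winMax ((done'.drop j).take K))
              = (List.range (done.length - K + 1)).map (fun j => winMax ((done.drop j).take K))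
                ++ [if topMax F2 B2 > topMax B2 F2 then topMax F2 B2 else topMax B2 F2] := by
            conv_lhs => rw [hrange, List.range_succ]
            rw [List.map_append, hstable]
            simp only [List.map_cons, List.map_nil]
            rw [hlast]
          rw [h4, if_pos hbefore, mUpd_some, hsplit, minOf_append_singleton _ (by simp) _]
          split_ifs <;> simp <;> omega
        · rw [h4, if_neg hbefore, mUpd_none]
          have h1' : done'.length - K + 1 = 1 := by rw [hlen']; omega
          rw [h1', List.range_one]
          simp only [List.map_cons, List.map_nil]
          have hK' : done'.length = K := by rw [hlen']; omega
          have : (done'.drop 0).take K = done'.drop (done'.length - K) := by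
            rw [hK', Nat.sub_self, List.drop_zero]
            apply List.take_of_length_le
            omega
          rw [this, ← hw]
          rfl
      · rw [if_neg (by omega : ¬ ((K : Int) - 1 ≤ (done.length : Int))),
          if_neg (by rw [hlen']; omega : ¬ K ≤ done'.length), h4,
          if_neg (by omega : ¬ K ≤ done.length)]
    rw [hE]
    have harg : ((done.length : Int) + 1) = ((done'.length : Nat) : Int) := by
      rw [hlen']; push_cast; ring
    rw [harg, ih done' F2 B2 _ hann1 hann2 hQ2 rfl]
    have happ : done' ++ rest = done ++ x :: rest := by
      rw [hdone', List.append_assoc]; rfl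
    rw [happ]
    have hlen2 : done'.length + rest.length = done.length + (x :: rest).length := by
      rw [hlen']; simp; omega
    rw [hlen2]

-- ===== VERDICT (by name: the statement is the Claim_ definition above) =====
theorem solution_spec : Claim_equal_solution := by
  intro stones k _hdom hpre
  unfold Spec_solution
  have hk1 : 1 ≤ kkN k := by unfold kkN; omega
  have hkkdef : (if k > 1 then k else 1) = ((kkN k : Nat) : Int) := by
    unfold kkN; split_ifs <;> omega
  have hA : solution stones k = solLoop stones k 0 (winMax stones) 0 := by
    obtain ⟨x, t, rfl⟩ := List.exists_cons_of_ne_nil hpre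
    simp [solution, PySem.List.max?_id_cons, winMax_cons]
  by_cases hc : kkN k ≤ stones.length
  · -- at least one window of length kkN k
    set c : Nat := stones.length - kkN k + 1 with hc_def
    set Wl : List Int := (List.range c).map (fun j => winMax ((stones.drop j).take (kkN k)))
      with hWl_def
    have hWne : Wl ≠ [] := by
      rw [hWl_def]
      simp [hc_def]
    have hwne : ∀ i : Nat, i + kkN k ≤ stones.length → (stones.drop i).take (kkN k) ≠ [] := by
      intro i hi hnil
      have hlen : ((stones.drop i).take (kkN k)).length = kkN k := by
        rw [List.length_take, List.length_drop]; omega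
      rw [hnil] at hlen
      simp at hlen
      omega
    have hbr : ∀ mid, badrun k mid stones ↔ minOf Wl < mid := by
      intro mid
      rw [minOf_lt_iff _ hWne]
      constructor
      · rintro ⟨i, hi, hall⟩
        refine ⟨winMax ((stones.drop i).take (kkN k)), ?_, ?_⟩
        · rw [hWl_def]
          exact List.mem_map_of_mem (List.mem_range.2 (by omega))
        · rw [winMax_lt_iff _ (hwne i hi)]
          exact hall
      · rintro ⟨v, hv, hlt⟩
        rw [hWl_def] at hv
        obtain ⟨i, hi, rfl⟩ := List.mem_map.1 hv
        have hi' : i + kkN k ≤ stones.length := by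
          have := List.mem_range.1 hi; omega
        exact ⟨i, hi', (winMax_lt_iff _ (hwne i hi') _).1 hlt⟩
    have hthr : ∀ mid, solInner k mid stones 0 = true ↔ mid ≤ minOf Wl := by
      intro mid
      rw [← Bool.not_eq_false, inner_zero_iff, hbr mid]
      exact not_lt
    have hmE : minOf Wl ≤ winMax stones := by
      have hmem := minOf_mem Wl hWne
      rw [hWl_def] at hmem
      obtain ⟨i, hi, heq⟩ := List.mem_map.1 hmem
      have hi' : i + kkN k ≤ stones.length := by
        have := List.mem_range.1 hi; omega
      have h1 : winMax ((stones.drop i).take (kkN k)) ∈ (stones.drop i).take (kkN k) :=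
        winMax_mem _ (hwne i hi')
      have h2 : winMax ((stones.drop i).take (kkN k)) ∈ stones :=
        List.mem_of_mem_drop (List.mem_of_mem_take h1)
      rw [← heq] at *
      exact le_winMax stones hpre _ h2
    -- B's value in this case: the two-stack queue computes min of the window maxima
    have hslide : slideQ ((kkN k : Nat) : Int) stones 0 [] [] none = some (minOf Wl) := by
      have h := slideQ_spec (kkN k) hk1 stones [] [] [] none trivial trivial
        (by simp [vals]) (by rw [if_neg (by simp only [List.length_nil]; omega)])
      simp only [List.length_nil, Nat.cast_zero, List.nil_append, Nat.zero_add] at h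
      rw [h, if_pos (by omega)]
    have hc' : ¬ ((if k > 1 then k else 1) > ((stones.length : Int))) := by
      rw [hkkdef]; omega
    have hB : solution_alt stones k = (if minOf Wl > 0 then minOf Wl else 0) := by
      simp only [solution_alt]
      rw [if_neg hc', hkkdef, hslide]
    rw [hA, loop_eq stones k (minOf Wl) hthr 0 (winMax stones) 0, hB]
    split_ifs <;> omega
  · -- window longer than the list: the check never fails
    have hP : ∀ mid, solInner k mid stones 0 = true := by
      intro mid
      rw [← Bool.not_eq_false, inner_zero_iff]
      rintro ⟨i, hi, _⟩
      omega
    have hc' : ((if k > 1 then k else 1) > ((stones.length : Int))) := by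
      rw [hkkdef]; omega
    have hB : solution_alt stones k = (if winMax stones > 0 then winMax stones else 0) := by
      simp only [solution_alt]
      rw [if_pos hc']
    rw [hA, loop_eq_true stones k hP 0 (winMax stones) 0, hB]
    split_ifs <;> omega
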